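-- pv_equiv track=rewrite | github.com/labrynx/envctl | src/envctl/adapters/dotenv.py | _unescape_double_quoted_value
-- ===== SOURCE A (Python) =====
-- def _unescape_double_quoted_value(value: str) -> str:
--     """Unescape supported dotenv double-quoted sequences."""
--     result: list[str] = []
--     index = 0
--
--     while index < len(value):
--         char = value[index]
--         if char != "\\":
--             result.append(char)
--             index += 1
--             continue
--
--         next_index = index + 1
--         if next_index >= len(value):
--             result.append("\\")
--             break
--
--         next_char = value[next_index]
--         if next_char in {"\\", '"', "$", "`"}:
--             result.append(next_char)
--         else:
--             result.append("\\")
--             result.append(next_char)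
--
--         index += 2
--
--     return "".join(result)
-- ===== SOURCE B (Python) =====
-- import re
--
-- _SPECIALS = {"\\", '"', "$", "`"}
--
--
-- def _repl(match: "re.Match[str]") -> str:
--     char = match.group(1)
--     return char if char in _SPECIALS else "\\" + char
--
--
-- def _unescape_double_quoted_value(value: str) -> str:
--     """Unescape supported dotenv double-quoted sequences."""
--     # One regex substitution: consume backslash+next-char pairs left to right;
--     # DOTALL lets '.' match newlines; a trailing lone backslash never matches.
--     return re.sub(r"\\(.)", _repl, value, flags=re.DOTALL)
-- ===== Notes on version B (the rewrite author's own statement) =====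
-- stated objective: idiomatic
-- what changed: Replaced A's hand-rolled index-driven while loop with result-list accumulator by a single re.sub over the pattern \(.) with a replacement callback (re.DOTALL so '.' matches newlines); the regex engine performs the left-to-right pair-consuming traversal.
import Mathlib
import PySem

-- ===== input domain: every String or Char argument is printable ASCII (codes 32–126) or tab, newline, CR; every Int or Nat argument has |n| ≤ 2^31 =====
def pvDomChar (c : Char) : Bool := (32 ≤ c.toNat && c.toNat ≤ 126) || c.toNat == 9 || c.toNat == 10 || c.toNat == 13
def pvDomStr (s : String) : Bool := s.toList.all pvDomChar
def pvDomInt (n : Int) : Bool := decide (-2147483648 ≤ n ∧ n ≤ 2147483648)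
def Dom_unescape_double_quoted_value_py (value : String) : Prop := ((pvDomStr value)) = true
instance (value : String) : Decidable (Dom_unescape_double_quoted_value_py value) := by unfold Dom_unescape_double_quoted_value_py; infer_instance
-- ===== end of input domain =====

-- B replaces A's index-driven while loop and accumulator with a single regex
-- substitution consuming backslash+char pairs (idiomatic); return values agree everywhere.

-- ===== PORT A =====
-- A's while loop: index arithmetic over the string, appending to a result list.
def pvLoopA (cs : List Char) (i : Nat) (acc : List Char) : List Char :=
  if h : i < cs.length then
    let c := cs[i]
    if c ≠ '\\' then
      pvLoopA cs (i + 1) (acc ++ [c])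
    else if cs.length ≤ i + 1 then
      acc ++ ['\\']
    else
      let nc := cs.getD (i + 1) ' '
      if nc = '\\' ∨ nc = '"' ∨ nc = '$' ∨ nc = '`' then
        pvLoopA cs (i + 2) (acc ++ [nc])
      else
        pvLoopA cs (i + 2) (acc ++ ['\\', nc])
  else acc
termination_by cs.length - i

def unescape_double_quoted_value_py (value : String) : String :=
  String.ofList (pvLoopA value.toList 0 [])

-- ===== PORT B =====
-- Source B's re.sub(r"\\(.)", _repl, value, flags=re.DOTALL): the regex engine's
-- left-to-right scan consuming '\'+char pairs, transcribed as structural recursion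
-- (Lean has no regex engine); a trailing lone '\' never matches and stays as-is.
def pvScanB : List Char → List Char
  | '\\' :: c :: rest =>
      if c = '\\' ∨ c = '"' ∨ c = '$' ∨ c = '`' then c :: pvScanB rest
      else '\\' :: c :: pvScanB rest
  | c :: rest => c :: pvScanB rest
  | [] => []

def unescape_double_quoted_value_py_alt (value : String) : String :=
  String.ofList (pvScanB value.toList)

-- ===== PRECONDITION & SPEC =====
def Spec_unescape_double_quoted_value_py (value : String) (out : String) : Prop := out = unescape_double_quoted_value_py_alt value
instance (value : String) (out : String) : Decidable (Spec_unescape_double_quoted_value_py value out) := by unfold Spec_unescape_double_quoted_value_py; infer_instance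

-- ===== CLAIM (what is proved, stated in full; the proofs are below) =====
def Claim_equal_unescape_double_quoted_value_py : Prop := ∀ (value : String), Dom_unescape_double_quoted_value_py value → Spec_unescape_double_quoted_value_py value (unescape_double_quoted_value_py value)

-- ===== LEMMAS AND PROOFS =====

theorem pvScanB_cons_ne (c : Char) (rest : List Char) (h : c ≠ '\\') :
    pvScanB (c :: rest) = c :: pvScanB rest := by
  cases rest <;> simp [pvScanB, h]

-- A's loop from position i produces acc followed by B's scan of the remaining suffix.
theorem pvLoopA_eq_scanB (cs : List Char) (i : Nat) (acc : List Char) :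
    pvLoopA cs i acc = acc ++ pvScanB (cs.drop i) := by
  induction i, acc using pvLoopA.induct cs with
  | case1 i acc h c hc ih =>
      rw [pvLoopA, dif_pos h, if_pos hc, ih, List.drop_eq_getElem_cons h,
        pvScanB_cons_ne _ _ hc]
      simp
  | case2 i acc h c hc hend =>
      rw [pvLoopA, dif_pos h, if_neg hc, if_pos hend]
      have hc' : cs[i] = '\\' := by simpa using hc
      have hnil : cs.drop (i + 1) = [] := List.drop_eq_nil_of_le (by omega)
      rw [List.drop_eq_getElem_cons h, hc', hnil]
      rfl
  | case3 i acc h c hc hend nc hspec ih =>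
      rw [pvLoopA, dif_pos h, if_neg hc, if_neg hend, if_pos hspec, ih]
      have hc' : cs[i] = '\\' := by simpa using hc
      have h1 : i + 1 < cs.length := by omega
      have hget : nc = cs[i + 1] := List.getD_eq_getElem _ _ h1
      rw [List.drop_eq_getElem_cons h, hc', List.drop_eq_getElem_cons h1]
      rw [hget] at hspec ⊢
      rw [pvScanB, if_pos hspec]
      simp
  | case4 i acc h c hc hend nc hspec ih =>
      rw [pvLoopA, dif_pos h, if_neg hc, if_neg hend, if_neg hspec, ih]
      have hc' : cs[i] = '\\' := by simpa using hc
      have h1 : i + 1 < cs.length := by omega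
      have hget : nc = cs[i + 1] := List.getD_eq_getElem _ _ h1
      rw [List.drop_eq_getElem_cons h, hc', List.drop_eq_getElem_cons h1]
      rw [hget] at hspec ⊢
      rw [pvScanB, if_neg hspec]
      simp
  | case5 i acc h =>
      rw [pvLoopA, dif_neg h]
      have : cs.drop i = [] := List.drop_eq_nil_of_le (by omega)
      simp [this, pvScanB]

-- ===== VERDICT (by name: the statement is the Claim_ definition above) =====
theorem unescape_double_quoted_value_py_spec : Claim_equal_unescape_double_quoted_value_py := by
  intro value _
  unfold Spec_unescape_double_quoted_value_py unescape_double_quoted_value_py unescape_double_quoted_value_py_alt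
  rw [pvLoopA_eq_scanB]
  simp
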